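-- pv_equiv track=rewrite | github.com/ranonymousse/cdv-explorer | paper/RQ3/collaboration_network_exported_layout.py | _sanitize_file_part
-- ===== SOURCE A (Python) =====
-- from typing import Any
--
-- def _sanitize_file_part(value: Any, fallback: str = "unknown") -> str:
--     text = str(value or "").strip()
--     if not text:
--         return fallback
--
--     sanitized = []
--     last_was_dash = False
--     for char in text:
--         if char.isalnum() or char in {".", "_"}:
--             sanitized.append(char)
--             last_was_dash = False
--             continue
--
--         if not last_was_dash:
--             sanitized.append("-")
--             last_was_dash = True
--
--     out = "".join(sanitized).strip("-")
--     return out or fallback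
-- ===== SOURCE B (Python) =====
-- from itertools import groupby
-- from typing import Any
--
--
-- def _keep(char: str) -> bool:
--     return char.isalnum() or char in {".", "_"}
--
--
-- def _sanitize_file_part(value: Any, fallback: str = "unknown") -> str:
--     text = str(value or "").strip()
--     if not text:
--         return fallback
--
--     parts = ["".join(group) if allowed else "-"
--              for allowed, group in groupby(text, key=_keep)]
--     out = "".join(parts).strip("-")
--     return out or fallback
-- ===== Notes on version B (the rewrite author's own statement) =====
-- stated objective: simpler
-- what changed: Replaces the manual last_was_dash state-machine loop with an itertools.groupby decomposition: group consecutive characters by the keep-predicate, emit each kept run verbatim and one dash per dropped run, then join and strip.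
import Mathlib
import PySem

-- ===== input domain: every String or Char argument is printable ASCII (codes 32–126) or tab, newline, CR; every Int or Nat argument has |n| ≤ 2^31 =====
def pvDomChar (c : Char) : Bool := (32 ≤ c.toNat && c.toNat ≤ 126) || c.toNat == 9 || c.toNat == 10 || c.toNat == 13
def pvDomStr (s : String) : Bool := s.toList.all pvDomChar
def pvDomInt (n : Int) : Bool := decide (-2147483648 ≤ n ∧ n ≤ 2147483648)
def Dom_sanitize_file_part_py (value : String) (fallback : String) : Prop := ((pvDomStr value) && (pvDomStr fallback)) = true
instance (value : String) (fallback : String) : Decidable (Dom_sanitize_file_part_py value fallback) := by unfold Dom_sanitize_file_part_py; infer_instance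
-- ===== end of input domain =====

-- B replaces A's manual last_was_dash state machine by a groupby decomposition
-- (group consecutive chars by the keep-predicate, emit each kept run verbatim and
-- one '-' per dropped run); objective: simpler. Same return value everywhere.

-- the shared character predicate: char.isalnum() or char in {'.', '_'}
def pvKeep (c : Char) : Bool := PySem.Chars.isalnum c || c == '.' || c == '_'

-- ===== PORT A =====
def sanitize_file_part_py (value : String) (fallback : String) : String :=
  -- text = str(value or "").strip()  (value is str: value or "" is value itself)
  let text := PySem.Chars.strip value.toList
  if text = [] then fallback
  else
    -- loop over text with state (sanitized, last_was_dash)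
    let st := text.foldl
      (fun (st : List Char × Bool) c =>
        if pvKeep c then (st.1 ++ [c], false)
        else if !st.2 then (st.1 ++ ['-'], true)
        else st)
      ([], false)
    let out := PySem.Chars.stripChars st.1 ['-']
    if out = [] then fallback else String.ofList out

-- ===== PORT B =====
-- itertools.groupby(text, key=pvKeep): list of (key, run) for maximal runs of equal key
def pvGroupby : List Char → List (Bool × List Char)
  | [] => []
  | c :: cs =>
    let k := pvKeep c
    (k, c :: cs.takeWhile (fun d => pvKeep d == k)) ::
      pvGroupby (cs.dropWhile (fun d => pvKeep d == k))
termination_by l => l.length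
decreasing_by
  simp only [List.length_cons]
  exact Nat.lt_succ_of_le (List.length_dropWhile_le _ _)

def sanitize_file_part_py_alt (value : String) (fallback : String) : String :=
  let text := PySem.Chars.strip value.toList
  if text = [] then fallback
  else
    let parts := (pvGroupby text).map (fun g => if g.1 then g.2 else ['-'])
    let out := PySem.Chars.stripChars (PySem.Chars.join [] parts) ['-']
    if out = [] then fallback else String.ofList out

-- ===== PRECONDITION & SPEC =====
def Spec_sanitize_file_part_py (value : String) (fallback : String) (out : String) : Prop := out = sanitize_file_part_py_alt value fallback
instance (value : String) (fallback : String) (out : String) : Decidable (Spec_sanitize_file_part_py value fallback out) := by unfold Spec_sanitize_file_part_py; infer_instance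

-- ===== CLAIM (what is proved, stated in full; the proofs are below) =====
def Claim_equal_sanitize_file_part_py : Prop := ∀ (value : String) (fallback : String), Dom_sanitize_file_part_py value fallback → Spec_sanitize_file_part_py value fallback (sanitize_file_part_py value fallback)

-- ===== LEMMAS AND PROOFS =====

-- A's loop written as a recursion on the character list (proof device only)
def pvProcA : List Char → Bool → List Char
  | [], _ => []
  | c :: cs, lw =>
    if pvKeep c then c :: pvProcA cs false
    else if lw then pvProcA cs true
    else '-' :: pvProcA cs true

theorem pvFoldl_eq_procA (l : List Char) (acc : List Char) (lw : Bool) :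
    (l.foldl
      (fun (st : List Char × Bool) c =>
        if pvKeep c then (st.1 ++ [c], false)
        else if !st.2 then (st.1 ++ ['-'], true)
        else st)
      (acc, lw)).1 = acc ++ pvProcA l lw := by
  induction l generalizing acc lw with
  | nil => simp [pvProcA]
  | cons c cs ih =>
    by_cases hk : pvKeep c
    · simp only [List.foldl_cons, hk, ite_true, ih, pvProcA,
        List.append_assoc, List.singleton_append]
    · cases lw <;>
        simp only [List.foldl_cons, hk, ite_false, Bool.not_true, Bool.not_false,
          Bool.false_eq_true, ite_true, ih, pvProcA, List.append_assoc,
          List.singleton_append]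

theorem pvProcA_keep_run (run rest : List Char) (h : ∀ d ∈ run, pvKeep d = true) :
    pvProcA (run ++ rest) false = run ++ pvProcA rest false := by
  induction run with
  | nil => rfl
  | cons d ds ih =>
    have hd : pvKeep d = true := h d (by simp)
    simp only [List.cons_append, pvProcA, hd, if_pos]
    simp [ih (fun e he => h e (by simp [he]))]

theorem pvProcA_drop_run (run rest : List Char) (h : ∀ d ∈ run, pvKeep d = false) :
    pvProcA (run ++ rest) true = pvProcA rest true := by
  induction run with
  | nil => rfl
  | cons d ds ih =>
    have hd : pvKeep d = false := h d (by simp)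
    simp only [List.cons_append, pvProcA, hd]
    simp [ih (fun e he => h e (by simp [he]))]

theorem pvProcA_true_eq_false (rest : List Char)
    (h : ∀ c, rest.head? = some c → pvKeep c = true) :
    pvProcA rest true = pvProcA rest false := by
  cases rest with
  | nil => rfl
  | cons c cs =>
    have := h c rfl
    simp [pvProcA, this]

theorem pvJoin_groupby_eq_procA (n : Nat) (l : List Char) (hn : l.length ≤ n) :
    PySem.Chars.join [] ((pvGroupby l).map (fun g => if g.1 then g.2 else ['-']))
      = pvProcA l false := by
  induction n generalizing l with
  | zero =>
    have : l = [] := List.eq_nil_of_length_eq_zero (Nat.le_zero.mp hn)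
    subst this
    simp [pvGroupby, PySem.Chars.join, List.intercalate, pvProcA]
  | succ n ih =>
    cases l with
    | nil => simp [pvGroupby, PySem.Chars.join, List.intercalate, pvProcA]
    | cons c cs =>
      rw [pvGroupby]
      set run := cs.takeWhile (fun d => pvKeep d == pvKeep c) with hrun
      set rest := cs.dropWhile (fun d => pvKeep d == pvKeep c) with hrest
      have hcs : cs = run ++ rest := (List.takeWhile_append_dropWhile).symm
      have hrestlen : rest.length ≤ n := by
        have hle := List.length_dropWhile_le (fun d => pvKeep d == pvKeep c) cs
        rw [← hrest] at hle
        simp only [List.length_cons] at hn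
        omega
      have hrunkeep : ∀ d ∈ run, pvKeep d = pvKeep c := by
        intro d hd
        have := List.mem_takeWhile_imp (hrun ▸ hd)
        simpa using this
      have hresthd : ∀ d, rest.head? = some d → pvKeep d = !(pvKeep c) := by
        intro d hd
        have h2 := List.head?_dropWhile_not (fun e => pvKeep e == pvKeep c) cs
        rw [← hrest] at h2
        rw [hd] at h2
        simp only [beq_eq_false_iff_ne, ne_eq] at h2
        rw [Bool.eq_not_iff]
        exact h2
      have hjoin_cons : ∀ (p : List Char) (ps : List (List Char)),
          PySem.Chars.join [] (p :: ps) = p ++ PySem.Chars.join [] ps := by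
        intro p ps
        cases ps with
        | nil => simp [PySem.Chars.join, List.intercalate]
        | cons q qs => rw [PySem.Chars.join_cons_cons]; simp
      rw [List.map_cons, hjoin_cons, ih rest hrestlen]
      cases hkc : pvKeep c with
      | true =>
        simp only [ite_true]
        have hrk : ∀ d ∈ run, pvKeep d = true := fun d hd => (hrunkeep d hd).trans hkc
        calc (c :: run) ++ pvProcA rest false
            = c :: (run ++ pvProcA rest false) := by simp
          _ = c :: pvProcA (run ++ rest) false := by rw [pvProcA_keep_run run rest hrk]
          _ = pvProcA (c :: cs) false := by
              rw [hcs]; simp [pvProcA, hkc]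
      | false =>
        simp only [Bool.false_eq_true, ite_false]
        have hrk : ∀ d ∈ run, pvKeep d = false := fun d hd => (hrunkeep d hd).trans hkc
        have hhd : ∀ d, rest.head? = some d → pvKeep d = true := by
          intro d hd
          have := hresthd d hd
          rw [hkc] at this
          simpa using this
        calc ['-'] ++ pvProcA rest false
            = '-' :: pvProcA rest true := by rw [pvProcA_true_eq_false rest hhd]; rfl
          _ = '-' :: pvProcA (run ++ rest) true := by rw [pvProcA_drop_run run rest hrk]
          _ = pvProcA (c :: cs) false := by
              rw [hcs]; simp [pvProcA, hkc]

theorem sanitize_file_part_py_spec : Claim_equal_sanitize_file_part_py := by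
  intro value fallback _
  unfold Spec_sanitize_file_part_py sanitize_file_part_py sanitize_file_part_py_alt
  simp only
  by_cases h : PySem.Chars.strip value.toList = []
  · simp [h]
  · simp only [h, if_false]
    rw [pvFoldl_eq_procA, List.nil_append,
      pvJoin_groupby_eq_procA (PySem.Chars.strip value.toList).length _ le_rfl]
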